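-- pv_equiv track=rewrite | github.com/nathanstouffer/sudoku | solver/sudoku.py | bad
-- ===== SOURCE A (Python) =====
-- def bad(arr):
--     for val in range(1, 10):                                                # iterate over the values of the sudoku
--         count = 0
--         for i in range(0, len(arr)):                                        # count appearances of the value
--             if (val == arr[i]):
--                 count += 1
--         if (count > 1):                                                     # test if there are more than one
--             return True
--     return False
-- ===== SOURCE B (Python) =====
-- def bad(arr):
--     # Single pass: track in-range (1..9) values already seen; a repeat means a duplicate.
--     seen = set()
--     for x in arr:
--         if 1 <= x <= 9:
--             if x in seen:
--                 return True
--             seen.add(x)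
--     return False
-- ===== Notes on version B (the rewrite author's own statement) =====
-- stated objective: faster
-- what changed: Replaces nine counting passes over the array (one per value 1-9) with a single pass maintaining a set of in-range values already seen.
import Mathlib
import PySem

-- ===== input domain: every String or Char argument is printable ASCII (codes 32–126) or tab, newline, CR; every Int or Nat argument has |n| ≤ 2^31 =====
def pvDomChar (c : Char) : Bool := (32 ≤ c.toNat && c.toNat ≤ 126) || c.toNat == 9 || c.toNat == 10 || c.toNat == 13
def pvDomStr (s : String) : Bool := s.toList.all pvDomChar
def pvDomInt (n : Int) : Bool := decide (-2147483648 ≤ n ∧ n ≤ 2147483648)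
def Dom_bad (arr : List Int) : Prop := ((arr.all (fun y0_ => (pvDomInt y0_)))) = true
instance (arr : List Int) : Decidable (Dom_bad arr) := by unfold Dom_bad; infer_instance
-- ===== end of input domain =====

-- B replaces A's nine counting passes (one per value 1..9) with a single pass keeping a set of in-range values already seen.

-- ===== PORT A =====
-- count = 0; for i in range(0, len(arr)): if val == arr[i]: count += 1
def badCount (arr : List Int) (val : Int) : Int :=
  (PySem.List.pyRange 0 (PySem.List.len arr) 1).foldl
    (fun count i => if val = PySem.List.pyGetD arr i 0 then count + 1 else count) 0

-- for val in range(1, 10): … if count > 1: return True … ; return False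
def badVals (arr : List Int) : List Int → Bool
  | [] => false
  | val :: rest => if badCount arr val > 1 then true else badVals arr rest

def bad (arr : List Int) : Bool := badVals arr (PySem.List.pyRange 1 10 1)

-- ===== PORT B =====
def badAltGo (seen : PySem.Set Int) : List Int → Bool
  | [] => false
  | x :: rest =>
    if 1 ≤ x ∧ x ≤ 9 then
      if PySem.Set.contains seen x then true else badAltGo (PySem.Set.add seen x) rest
    else badAltGo seen rest

def bad_alt (arr : List Int) : Bool := badAltGo PySem.Set.empty arr

-- ===== PRECONDITION & SPEC =====
def Spec_bad (arr : List Int) (out : Bool) : Prop := out = bad_alt arr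
instance (arr : List Int) (out : Bool) : Decidable (Spec_bad arr out) := by unfold Spec_bad; infer_instance

-- ===== CLAIM (what is proved, stated in full; the proofs are below) =====
def Claim_equal_bad : Prop := ∀ (arr : List Int), Dom_bad arr → Spec_bad arr (bad arr)

-- ===== LEMMAS AND PROOFS =====

-- A's inner loop counts occurrences of val in arr
theorem badCount_eq (arr : List Int) (val : Int) :
    badCount arr val = (arr.count val : Int) := by
  unfold badCount
  rw [PySem.List.foldl_pyRange_zero_pyGetD arr 0
        (fun count x => if val = x then count + 1 else count) 0]
  have : (fun (count : Int) (x : Int) => if val = x then count + 1 else count)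
       = (fun (count : Int) (x : Int) => if (fun y => y == val) x = true then count + 1 else count) := by
    funext c x
    by_cases h : val = x
    · subst h; simp
    · have hx : (x == val) = false := beq_eq_false_iff_ne.mpr (Ne.symm h)
      simp [h, hx]
  rw [this, PySem.List.foldl_count_if (fun y => y == val) arr 0, List.count]
  simp

-- A's outer loop is an existence test over the candidate values
theorem badVals_eq_any (arr : List Int) (l : List Int) :
    badVals arr l = l.any (fun v => decide (2 ≤ arr.count v)) := by
  induction l with
  | nil => rfl
  | cons v rest ih =>
    simp only [badVals, List.any_cons, ih, badCount_eq]
    by_cases h : 2 ≤ arr.count v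
    · have : (arr.count v : Int) > 1 := by exact_mod_cast h
      simp [this, h]
    · have : ¬ (arr.count v : Int) > 1 := by omega
      simp [this, h]

theorem bad_iff (arr : List Int) :
    bad arr = true ↔ ∃ v, 1 ≤ v ∧ v ≤ 9 ∧ 2 ≤ arr.count v := by
  unfold bad
  rw [badVals_eq_any, List.any_eq_true]
  constructor
  · rintro ⟨v, hv, h⟩
    rw [PySem.List.mem_pyRange_one] at hv
    exact ⟨v, hv.1, by omega, by simpa using h⟩
  · rintro ⟨v, h1, h2, h3⟩
    exact ⟨v, by rw [PySem.List.mem_pyRange_one]; omega, by simpa using h3⟩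

-- B's loop invariant: with `seen` the set of in-range values already consumed,
-- it detects an in-range value that is repeated (across seen + rest or within rest)
theorem badAltGo_iff (l : List Int) (seen : PySem.Set Int) :
    badAltGo seen l = true ↔
      ∃ v, 1 ≤ v ∧ v ≤ 9 ∧ ((v ∈ seen ∧ v ∈ l) ∨ 2 ≤ l.count v) := by
  induction l generalizing seen with
  | nil => simp [badAltGo]
  | cons x rest ih =>
    by_cases hx : 1 ≤ x ∧ x ≤ 9
    · by_cases hm : x ∈ seen
      · have : PySem.Set.contains seen x = true := (PySem.Set.contains_iff seen x).mpr hm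
        simp only [badAltGo, if_pos hx, this, reduceIte]
        constructor
        · intro _; exact ⟨x, hx.1, hx.2, Or.inl ⟨hm, List.mem_cons_self⟩⟩
        · intro _; trivial
      · have : PySem.Set.contains seen x = false := by
          rw [Bool.eq_false_iff]
          intro hc; exact hm ((PySem.Set.contains_iff seen x).mp hc)
        simp only [badAltGo, if_pos hx, this, Bool.false_eq_true, reduceIte, ih]
        constructor
        · rintro ⟨v, h1, h2, hcase⟩
          refine ⟨v, h1, h2, ?_⟩
          rcases hcase with ⟨hs, hr⟩ | hc
          · rcases (PySem.Set.mem_add seen x v).mp hs with hs' | rfl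
            · exact Or.inl ⟨hs', List.mem_cons_of_mem _ hr⟩
            · right
              rw [List.count_cons_self]
              have : 1 ≤ rest.count v := List.count_pos_iff.mpr hr
              omega
          · right
            rw [List.count_cons]
            omega
        · rintro ⟨v, h1, h2, hcase⟩
          refine ⟨v, h1, h2, ?_⟩
          rcases hcase with ⟨hs, hr⟩ | hc
          · have hvx : v ≠ x := fun h => hm (h ▸ hs)
            rcases List.mem_cons.mp hr with rfl | hr'
            · exact absurd rfl hvx
            · exact Or.inl ⟨(PySem.Set.mem_add seen x v).mpr (Or.inl hs), hr'⟩
          · by_cases hvx : v = x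
            · subst hvx
              rw [List.count_cons_self] at hc
              have : v ∈ rest := List.count_pos_iff.mp (by omega)
              exact Or.inl ⟨(PySem.Set.mem_add seen v v).mpr (Or.inr rfl), this⟩
            · right
              rw [List.count_cons] at hc
              simp [Ne.symm hvx] at hc
              omega
    · simp only [badAltGo, if_neg hx, ih]
      constructor
      · rintro ⟨v, h1, h2, hcase⟩
        refine ⟨v, h1, h2, ?_⟩
        rcases hcase with ⟨hs, hr⟩ | hc
        · exact Or.inl ⟨hs, List.mem_cons_of_mem _ hr⟩
        · right; rw [List.count_cons]; omega
      · rintro ⟨v, h1, h2, hcase⟩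
        have hvx : v ≠ x := fun h => hx (h ▸ ⟨h1, h2⟩)
        refine ⟨v, h1, h2, ?_⟩
        rcases hcase with ⟨hs, hr⟩ | hc
        · rcases List.mem_cons.mp hr with rfl | hr'
          · exact absurd rfl hvx
          · exact Or.inl ⟨hs, hr'⟩
        · right
          rw [List.count_cons] at hc
          simp [Ne.symm hvx] at hc
          omega

theorem bad_alt_iff (arr : List Int) :
    bad_alt arr = true ↔ ∃ v, 1 ≤ v ∧ v ≤ 9 ∧ 2 ≤ arr.count v := by
  unfold bad_alt
  rw [badAltGo_iff]
  constructor
  · rintro ⟨v, h1, h2, hcase⟩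
    refine ⟨v, h1, h2, ?_⟩
    rcases hcase with ⟨hs, _⟩ | hc
    · simp [PySem.Set.empty] at hs
    · exact hc
  · rintro ⟨v, h1, h2, h3⟩
    exact ⟨v, h1, h2, Or.inr h3⟩

-- ===== VERDICT (by name: the statement is the Claim_ definition above) =====
theorem bad_spec : Claim_equal_bad := by
  intro arr _
  unfold Spec_bad
  rw [Bool.eq_iff_iff, bad_iff, bad_alt_iff]
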